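-- pv_equiv track=rewrite | github.com/julesmrt/Algorithmic-complexity | part2/ex03/matching3.py | verify_matching
-- ===== SOURCE A (Python) =====
-- def verify_matching(G, matching):
--     nodes = set()
--     for u, v in matching:
--         if u in nodes or v in nodes:
--             return False
--         nodes.add(u)
--         nodes.add(v)
--     return True
-- ===== SOURCE B (Python) =====
-- def verify_matching(G, matching):
--     for i, (u, v) in enumerate(matching):
--         for x, y in matching[i + 1:]:
--             if u == x or u == y or v == x or v == y:
--                 return False
--     return True
-- ===== Notes on version B (the rewrite author's own statement) =====
-- stated objective: alternative
-- what changed: Replaces A's single pass with a growing seen-set by a brute-force pairwise check that no two distinct edges share an endpoint.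
import Mathlib
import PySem

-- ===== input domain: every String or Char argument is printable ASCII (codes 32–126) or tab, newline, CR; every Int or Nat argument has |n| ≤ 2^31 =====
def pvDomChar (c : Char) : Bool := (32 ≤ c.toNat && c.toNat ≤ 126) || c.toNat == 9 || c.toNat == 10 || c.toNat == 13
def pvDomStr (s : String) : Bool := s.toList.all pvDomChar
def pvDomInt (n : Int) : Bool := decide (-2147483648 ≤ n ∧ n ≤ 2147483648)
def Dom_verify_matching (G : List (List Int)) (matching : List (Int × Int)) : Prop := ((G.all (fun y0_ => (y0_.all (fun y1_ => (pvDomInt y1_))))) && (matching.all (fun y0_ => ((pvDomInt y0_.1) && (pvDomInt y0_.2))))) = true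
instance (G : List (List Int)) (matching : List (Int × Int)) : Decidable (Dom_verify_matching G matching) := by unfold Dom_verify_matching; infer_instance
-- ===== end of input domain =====

-- B replaces A's seen-set scan by a brute-force pairwise disjointness check of the
-- edges (alternative decomposition); return value only, no mutation involved.

-- ===== PORT A =====
-- the 'for u, v in matching' loop with early 'return False', nodes a Python set
def vmGoA (nodes : PySem.Set Int) : List (Int × Int) → Bool
  | [] => true
  | (u, v) :: rest =>
    if PySem.Set.contains nodes u || PySem.Set.contains nodes v then false
    else vmGoA (PySem.Set.add (PySem.Set.add nodes u) v) rest

def verify_matching (G : List (List Int)) (matching : List (Int × Int)) : Bool :=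
  vmGoA PySem.Set.empty matching

-- ===== PORT B =====
-- inner loop: 'for x, y in matching[i+1:]' with the early 'return False'
def vmClash (u v : Int) : List (Int × Int) → Bool
  | [] => false
  | (x, y) :: rest =>
    if u = x || u = y || v = x || v = y then true else vmClash u v rest

-- outer loop: edge (u, v) against the remaining edges matching[i+1:] (= the tail)
def vmGoB : List (Int × Int) → Bool
  | [] => true
  | (u, v) :: rest => if vmClash u v rest then false else vmGoB rest

def verify_matching_alt (G : List (List Int)) (matching : List (Int × Int)) : Bool :=
  vmGoB matching

-- ===== PRECONDITION & SPEC =====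
def Spec_verify_matching (G : List (List Int)) (matching : List (Int × Int)) (out : Bool) : Prop := out = verify_matching_alt G matching
instance (G : List (List Int)) (matching : List (Int × Int)) (out : Bool) : Decidable (Spec_verify_matching G matching out) := by unfold Spec_verify_matching; infer_instance

-- ===== CLAIM (what is proved, stated in full; the proofs are below) =====
def Claim_equal_verify_matching : Prop := ∀ (G : List (List Int)) (matching : List (Int × Int)), Dom_verify_matching G matching → Spec_verify_matching G matching (verify_matching G matching)

-- ===== LEMMAS AND PROOFS =====

theorem vmClash_eq_false (u v : Int) (t : List (Int × Int)) :
    vmClash u v t = false ↔ ∀ p ∈ t, u ≠ p.1 ∧ u ≠ p.2 ∧ v ≠ p.1 ∧ v ≠ p.2 := by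
  induction t with
  | nil => simp [vmClash]
  | cons p rest ih =>
    obtain ⟨x, y⟩ := p
    by_cases h : (u = x || u = y || v = x || v = y) = true
    · simp only [vmClash, if_pos h]
      simp only [Bool.or_eq_true, decide_eq_true_eq] at h
      constructor
      · intro hf; cases hf
      · intro hall
        have := hall (x, y) (List.mem_cons_self)
        tauto
    · simp only [vmClash, if_neg h, ih]
      simp only [Bool.or_eq_true, decide_eq_true_eq, not_or] at h
      obtain ⟨⟨⟨h1, h2⟩, h3⟩, h4⟩ := h
      constructor
      · intro hall p hp
        rcases List.mem_cons.mp hp with rfl | hp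
        · exact ⟨h1, h2, h3, h4⟩
        · exact hall p hp
      · intro hall p hp; exact hall p (List.mem_cons_of_mem _ hp)

/-- A's loop on seen-set `s` succeeds iff no remaining endpoint is in `s` and the
remaining edges are pairwise endpoint-disjoint (B's condition). -/
theorem vmGoA_iff (ms : List (Int × Int)) (s : PySem.Set Int) :
    vmGoA s ms = true ↔ (∀ p ∈ ms, p.1 ∉ s ∧ p.2 ∉ s) ∧ vmGoB ms = true := by
  induction ms generalizing s with
  | nil => simp [vmGoA, vmGoB]
  | cons e rest ih =>
    obtain ⟨u, v⟩ := e
    by_cases hmem : (PySem.Set.contains s u || PySem.Set.contains s v) = true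
    · simp only [vmGoA, if_pos hmem]
      simp only [Bool.or_eq_true, PySem.Set.contains_iff] at hmem
      constructor
      · intro hf; cases hf
      · intro ⟨hall, _⟩
        have := hall (u, v) (List.mem_cons_self)
        tauto
    · have hu : u ∉ s := fun h => hmem (by simp [h])
      have hv : v ∉ s := fun h => hmem (by simp [h])
      simp only [vmGoA, if_neg hmem, ih]
      have hgoB : (vmGoB ((u, v) :: rest) = true) ↔
          (vmClash u v rest = false ∧ vmGoB rest = true) := by
        by_cases hc : vmClash u v rest <;> simp [vmGoB, hc]
      rw [hgoB, vmClash_eq_false]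
      constructor
      · intro ⟨hall, hb⟩
        refine ⟨?_, ?_, hb⟩
        · intro p hp
          rcases List.mem_cons.mp hp with rfl | hp
          · exact ⟨hu, hv⟩
          · have := hall p hp
            simp only [PySem.Set.mem_add, not_or] at this
            exact ⟨this.1.1.1, this.2.1.1⟩
        · intro p hp
          have := hall p hp
          simp only [PySem.Set.mem_add, not_or] at this
          refine ⟨fun h => this.1.1.2 h.symm, fun h => this.2.1.2 h.symm,
                  fun h => this.1.2 h.symm, fun h => this.2.2 h.symm⟩
      · intro ⟨hall, hcl, hb⟩
        refine ⟨?_, hb⟩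
        intro p hp
        have h1 := hall p (List.mem_cons_of_mem _ hp)
        have h2 := hcl p hp
        simp only [PySem.Set.mem_add, not_or]
        exact ⟨⟨⟨h1.1, fun h => h2.1 h.symm⟩, fun h => h2.2.2.1 h.symm⟩,
               ⟨⟨h1.2, fun h => h2.2.1 h.symm⟩, fun h => h2.2.2.2 h.symm⟩⟩

-- ===== VERDICT (by name: the statement is the Claim_ definition above) =====
theorem verify_matching_spec : Claim_equal_verify_matching := by
  intro G ms _
  unfold Spec_verify_matching verify_matching verify_matching_alt
  rw [Bool.eq_iff_iff, vmGoA_iff]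
  simp [PySem.Set.empty]
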